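-- pv_equiv track=rewrite | github.com/superoverflow/simple-python-template | src/main.py | get_land_parcels
-- ===== SOURCE A (Python) =====
-- from typing import List, Dict
--
-- def get_land_parcels(land_parcels: List[Dict[str, str]]) -> Dict[str, List[str]]:
--     result = {}
--     for lp in land_parcels:
--         companyId = lp["companyId"]
--         landId = lp["id"]
--
--         lands = result.get(companyId) or []
--         lands.append(landId)
--         result[companyId] = lands
--     return result
-- ===== SOURCE B (Python) =====
-- def get_land_parcels(land_parcels):
--     companies = list(dict.fromkeys(lp["companyId"] for lp in land_parcels))
--     return {c: [lp["id"] for lp in land_parcels if lp["companyId"] == c]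
--             for c in companies}
-- ===== Notes on version B (the rewrite author's own statement) =====
-- stated objective: alternative
-- what changed: A builds the grouping in one hash-accumulation pass appending to per-company lists; B first computes the distinct companyIds in first-occurrence order (dict.fromkeys) and then builds each group's id list by a filtering comprehension over the whole input.
import Mathlib
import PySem

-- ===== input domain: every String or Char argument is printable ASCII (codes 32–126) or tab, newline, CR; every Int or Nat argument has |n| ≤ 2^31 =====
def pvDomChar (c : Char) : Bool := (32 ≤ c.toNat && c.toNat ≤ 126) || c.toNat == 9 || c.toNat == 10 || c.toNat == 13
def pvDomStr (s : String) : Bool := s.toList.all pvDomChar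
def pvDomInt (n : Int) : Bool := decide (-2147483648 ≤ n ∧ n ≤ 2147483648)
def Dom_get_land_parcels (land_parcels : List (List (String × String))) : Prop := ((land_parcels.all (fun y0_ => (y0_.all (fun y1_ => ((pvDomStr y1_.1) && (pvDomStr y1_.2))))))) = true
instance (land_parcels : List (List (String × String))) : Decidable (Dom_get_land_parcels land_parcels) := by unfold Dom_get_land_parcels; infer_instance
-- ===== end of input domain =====

-- B replaces A's single hash-accumulation pass by 'distinct companies, then one filtering pass per company' (alternative decomposition, return value only).

-- ===== PORT A =====
-- literal transliteration of A's loop: result is a dict, lp["k"] is first-match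
-- lookup in the association list lp (getD "" is a totality default; Pre_ guarantees the key is present)
def get_land_parcels (land_parcels : List (List (String × String))) : List (String × List String) :=
  (land_parcels.foldl (fun (result : PySem.Dict String (List String)) lp =>
      let companyId := ((PySem.Dict.mk lp).get? "companyId").getD ""
      let landId := ((PySem.Dict.mk lp).get? "id").getD ""
      -- 'result.get(companyId) or []' : missing key or falsy (empty) list → []
      let lands := match result.get? companyId with
                   | some l => if l = [] then [] else l
                   | none => []
      result.insert companyId (lands ++ [landId])) PySem.Dict.empty).items

-- ===== PORT B =====
def pvCid (lp : List (String × String)) : String := ((PySem.Dict.mk lp).get? "companyId").getD ""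
def pvLid (lp : List (String × String)) : String := ((PySem.Dict.mk lp).get? "id").getD ""

def get_land_parcels_alt (land_parcels : List (List (String × String))) : List (String × List String) :=
  let companies := PySem.List.dedup (land_parcels.map pvCid)
  companies.map (fun c =>
    (c, (land_parcels.filter (fun lp => pvCid lp == c)).map pvLid))

-- ===== PRECONDITION & SPEC =====
-- Pre_ excludes exactly the inputs on which Python A raises KeyError: a parcel missing the "companyId" or "id" key.
def Pre_get_land_parcels (land_parcels : List (List (String × String))) : Prop :=
  ∀ lp ∈ land_parcels, "companyId" ∈ lp.map Prod.fst ∧ "id" ∈ lp.map Prod.fst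
instance (land_parcels : List (List (String × String))) : Decidable (Pre_get_land_parcels land_parcels) := by unfold Pre_get_land_parcels; infer_instance

def pvWitness_get_land_parcels : (List (List (String × String))) :=
  [[("companyId", "acme"), ("id", "p1")], [("companyId", "acme"), ("id", "p2")], [("companyId", "b"), ("id", "p3")]]

def Spec_get_land_parcels (land_parcels : List (List (String × String))) (out : List (String × List String)) : Prop := out = get_land_parcels_alt land_parcels
instance (land_parcels : List (List (String × String))) (out : List (String × List String)) : Decidable (Spec_get_land_parcels land_parcels out) := by unfold Spec_get_land_parcels; infer_instance

-- ===== CLAIM (what is proved, stated in full; the proofs are below) =====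
def Claim_equal_get_land_parcels : Prop := ∀ (land_parcels : List (List (String × String))), Dom_get_land_parcels land_parcels → Pre_get_land_parcels land_parcels → Spec_get_land_parcels land_parcels (get_land_parcels land_parcels)

-- ===== LEMMAS AND PROOFS =====

-- A's fold body, with the 'or []' branch simplified away ('if l = [] then [] else l' is l).
theorem pv_body_eq (result : PySem.Dict String (List String)) (lp : List (String × String)) :
    (let companyId := ((PySem.Dict.mk lp).get? "companyId").getD ""
     let landId := ((PySem.Dict.mk lp).get? "id").getD ""
     let lands := match result.get? companyId with
                  | some l => if l = [] then [] else l
                  | none => []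
     result.insert companyId (lands ++ [landId]))
    = result.insert (pvCid lp) (result.getD (pvCid lp) [] ++ [pvLid lp]) := by
  simp only [pvCid, pvLid, PySem.Dict.getD_eq_get?_getD]
  cases h : result.get? (((PySem.Dict.mk lp).get? "companyId").getD "") with
  | none => simp
  | some l => cases l <;> simp

theorem pv_getD_foldl_insert_append (l : List (List (String × String)))
    (d : PySem.Dict String (List String)) (c : String) :
    (l.foldl (fun d lp => d.insert (pvCid lp) (d.getD (pvCid lp) [] ++ [pvLid lp])) d).getD c []
    = d.getD c [] ++ (l.filter (fun lp => pvCid lp == c)).map pvLid := by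
  induction l generalizing d with
  | nil => simp
  | cons x xs ih =>
      simp only [List.foldl_cons, ih, List.filter_cons]
      by_cases h : pvCid x = c
      · subst h; simp [PySem.Dict.getD_insert_self]
      · have h2 : c ≠ pvCid x := Ne.symm h
        simp [PySem.Dict.getD_insert, h2, h]

-- ===== VERDICT (by name: the statement is the Claim_ definition above) =====
theorem get_land_parcels_spec : Claim_equal_get_land_parcels := by
  intro land_parcels _ _
  unfold Spec_get_land_parcels get_land_parcels get_land_parcels_alt
  have hbody : (fun (result : PySem.Dict String (List String)) lp =>
      let companyId := ((PySem.Dict.mk lp).get? "companyId").getD ""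
      let landId := ((PySem.Dict.mk lp).get? "id").getD ""
      let lands := match result.get? companyId with
                   | some l => if l = [] then [] else l
                   | none => []
      result.insert companyId (lands ++ [landId]))
      = (fun (result : PySem.Dict String (List String)) lp =>
          result.insert (pvCid lp) (result.getD (pvCid lp) [] ++ [pvLid lp])) := by
    funext result lp; exact pv_body_eq result lp
  rw [hbody]
  set d := land_parcels.foldl (fun (result : PySem.Dict String (List String)) lp =>
      result.insert (pvCid lp) (result.getD (pvCid lp) [] ++ [pvLid lp])) PySem.Dict.empty with hd
  have hnd : d.keys.Nodup := by
    rw [hd]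
    exact PySem.Dict.nodup_keys_foldl_insert_key land_parcels pvCid _ _ PySem.Dict.nodup_keys_empty
  have hkeys : d.keys = PySem.List.dedup (land_parcels.map pvCid) := by
    rw [hd, PySem.Dict.keys_foldl_insert_key]
    simp [PySem.Set.update_nil_left, PySem.Dict.keys_empty]
  rw [PySem.Dict.items_eq_map_keys d hnd [], hkeys]
  refine List.map_congr_left (fun c hc => ?_)
  rw [hd, pv_getD_foldl_insert_append]
  simp
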